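-- pv_equiv track=rewrite | github.com/jckling/CUC-Courses | DFA/DFA.py | spDFA
-- ===== SOURCE A (Python) =====
-- def symbol_reach(node, edges, symbol):
--     for edge in edges:
--         if edge[0] == node and edge[2] == symbol:
--             return edge[1]
--
-- def same_set(node1, node2, sets):
--     for set in sets:
--         if node1 in set and node2 in set:
--             return True
--     return False
--
-- def spDFA(sets, edges, symbol):
--     new_sets = []
--     for set in sets:
--         if (len(set)>1):
--             flag = [0]*len(set)
--             for i in range(len(set)):
--                 if flag[i]==0:
--                     temp, flag[i] = [set[i]], 1
--                     for j in range(i+1, len(set)):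
--                         a, b = symbol_reach(set[i], edges, symbol), symbol_reach(set[j], edges, symbol)
--                         if a==b or same_set(a, b, sets):
--                             temp.append(set[j])
--                             flag[j] = 1
--                     new_sets.append(temp)
--         else:
--             new_sets.append(set)
--     return new_sets
-- ===== SOURCE B (Python) =====
-- def spDFA(sets, edges, symbol):
--     # Canonical-key bucketing: each state maps to the equivalence class of its
--     # symbol-successor (the index of the set containing it, or the raw successor
--     # when it lies in no set); states of a block are hashed into ordered buckets
--     # by that key, with no pairwise comparisons at all.
--     succ = {}
--     for u, v, sym in edges:
--         if sym == symbol and u not in succ: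
--             succ[u] = v
--
--     cls = {}
--     for i, block in enumerate(sets):
--         for x in block:
--             cls.setdefault(x, i)
--
--     def key(x):
--         t = succ.get(x)
--         c = cls.get(t)
--         return (c, None) if c is not None else (None, t)
--
--     new_sets = []
--     for block in sets:
--         if len(block) > 1:
--             buckets = {}
--             for x in block:
--                 buckets.setdefault(key(x), []).append(x)
--             new_sets.extend(buckets.values())
--         else:
--             new_sets.append(block)
--     return new_sets
-- ===== Notes on version B (the rewrite author's own statement) =====
-- stated objective: faster
-- what changed: B replaces A's quadratic pairwise greedy grouping (nested index loops, each pair rescanning the edge list and the block list) by canonical-key bucketing: it precomputes a successor dict and a state-to-block-index dict once, assigns each state one hashable key (its successor's block index, or the raw successor), and buckets each block's states into an insertion-ordered dict in one pass with no pairwise tests; …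
import Mathlib
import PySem

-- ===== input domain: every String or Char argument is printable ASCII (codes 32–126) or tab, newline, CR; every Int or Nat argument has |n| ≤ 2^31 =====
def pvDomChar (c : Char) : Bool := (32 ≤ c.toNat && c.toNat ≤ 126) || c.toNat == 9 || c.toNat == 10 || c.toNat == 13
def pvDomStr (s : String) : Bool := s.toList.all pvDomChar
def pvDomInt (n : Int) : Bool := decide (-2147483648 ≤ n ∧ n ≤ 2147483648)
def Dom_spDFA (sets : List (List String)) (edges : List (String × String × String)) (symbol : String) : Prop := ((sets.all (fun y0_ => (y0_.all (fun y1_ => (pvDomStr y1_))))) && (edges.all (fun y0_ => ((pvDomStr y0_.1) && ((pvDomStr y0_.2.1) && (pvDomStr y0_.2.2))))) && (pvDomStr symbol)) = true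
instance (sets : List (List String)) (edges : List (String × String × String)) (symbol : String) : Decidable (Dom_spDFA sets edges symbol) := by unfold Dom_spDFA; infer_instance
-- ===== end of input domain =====

-- B buckets each block's states by one canonical successor-class key computed from two
-- precomputed dicts (no pairwise tests), instead of A's nested pairwise greedy grouping;
-- Pre_ restricts to pairwise-disjoint blocks (a partition), A's natural domain.

-- ===== PORT A =====
def symbolReach (node : String) (edges : List (String × String × String)) (symbol : String) : Option String :=
  match edges with
  | [] => none
  | e :: rest => if e.1 == node && e.2.2 == symbol then some e.2.1 else symbolReach node rest symbol

-- 'node in set' where node may be Python None (never matches a string element)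
def pyOptIn (a : Option String) (s : List String) : Bool := s.any (fun x => some x == a)

def sameSet (a b : Option String) (sets : List (List String)) : Bool :=
  match sets with
  | [] => false
  | s :: rest => if pyOptIn a s && pyOptIn b s then true else sameSet a b rest

def spDFA (sets : List (List String)) (edges : List (String × String × String)) (symbol : String) : List (List String) :=
  sets.foldl (fun new_sets s =>
    if s.length > 1 then
      let st := (List.range s.length).foldl (fun (st : List Nat × List (List String)) i =>
        if st.1.getD i 0 == 0 then
          let r := (List.range' (i+1) (s.length - (i+1))).foldl
            (fun (st2 : List String × List Nat) j =>
              let a := symbolReach (s.getD i "") edges symbol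
              let b := symbolReach (s.getD j "") edges symbol
              if a == b || sameSet a b sets then (st2.1 ++ [s.getD j ""], st2.2.set j 1) else st2)
            ([s.getD i ""], st.1.set i 1)
          (r.2, st.2 ++ [r.1])
        else st) (List.replicate s.length 0, ([] : List (List String)))
      new_sets ++ st.2
    else new_sets ++ [s]) []

-- ===== PORT B =====
-- succ = first symbol-labelled edge out of each node
def succMap (edges : List (String × String × String)) (symbol : String) : PySem.Dict String String :=
  edges.foldl (fun d e => if e.2.2 == symbol && !(d.contains e.1) then d.insert e.1 e.2.1 else d)
    PySem.Dict.empty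

-- cls = index of the first block containing each state (setdefault keeps the first)
def clsMap (sets : List (List String)) : PySem.Dict String Int :=
  (PySem.List.enumerate sets 0).foldl
    (fun d p => p.2.foldl (fun d x => d.setdefault x p.1) d) PySem.Dict.empty

-- key(x): cls.get(t) with t possibly Python None (a str-keyed dict: None is never a key)
def keyB (succ : PySem.Dict String String) (cls : PySem.Dict String Int) (x : String) :
    Option Int × Option String :=
  let t := succ.get? x
  let c := match t with | none => none | some v => cls.get? v
  match c with
  | some i => (some i, none)
  | none => (none, t)

def spDFA_alt (sets : List (List String)) (edges : List (String × String × String)) (symbol : String) : List (List String) :=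
  let succ := succMap edges symbol
  let cls := clsMap sets
  sets.foldl (fun new_sets block =>
    if block.length > 1 then
      new_sets ++ (block.foldl
        (fun (d : PySem.Dict (Option Int × Option String) (List String)) x =>
          d.modify (keyB succ cls x) [] (fun g => g ++ [x])) PySem.Dict.empty).values
    else new_sets ++ [block]) []

-- ===== PRECONDITION & SPEC =====
-- the states that can appear as a symbol-successor (the only states whose block membership
-- A's relation ever consults)
def symTargets (edges : List (String × String × String)) (symbol : String) : List String :=
  (edges.filter (fun e => e.2.2 == symbol)).map (fun e => e.2.1)

-- Pre_ excludes inputs where two different blocks share a state that is a symbol-successor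
-- (the block list is not a partition of the relevant states): there A's greedy closure of the
-- then non-transitive successor relation is an order-dependent accident and B's canonical
-- bucketing is an equally defensible choice.
def Pre_spDFA (sets : List (List String)) (edges : List (String × String × String)) (symbol : String) : Prop :=
  List.Pairwise (fun u w => ∀ x ∈ u, x ∈ symTargets edges symbol → x ∉ w) sets
instance (sets : List (List String)) (edges : List (String × String × String)) (symbol : String) : Decidable (Pre_spDFA sets edges symbol) := by unfold Pre_spDFA; infer_instance

def pvWitness_spDFA : List (List String) × (List (String × String × String)) × String :=
  ([["a", "b"], ["c"]], [("a", "c", "0"), ("b", "a", "0")], "0")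

def Spec_spDFA (sets : List (List String)) (edges : List (String × String × String)) (symbol : String) (out : List (List String)) : Prop := out = spDFA_alt sets edges symbol
instance (sets : List (List String)) (edges : List (String × String × String)) (symbol : String) (out : List (List String)) : Decidable (Spec_spDFA sets edges symbol out) := by unfold Spec_spDFA; infer_instance

-- ===== CLAIM (what is proved, stated in full; the proofs are below) =====
def Claim_equal_spDFA : Prop := ∀ (sets : List (List String)) (edges : List (String × String × String)) (symbol : String), Dom_spDFA sets edges symbol → Pre_spDFA sets edges symbol → Spec_spDFA sets edges symbol (spDFA sets edges symbol)

-- ===== LEMMAS AND PROOFS =====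

-- ---- characterisation of succMap: dict lookup = first matching edge ----
theorem succMap_aux (symbol : String) (node : String) :
    ∀ (edges : List (String × String × String)) (d : PySem.Dict String String),
    (edges.foldl (fun d e => if e.2.2 == symbol && !(d.contains e.1) then d.insert e.1 e.2.1 else d) d).get? node
      = if (d.get? node).isSome then d.get? node else symbolReach node edges symbol := by
  intro edges
  induction edges with
  | nil =>
    intro d
    cases h : d.get? node <;> simp [symbolReach, h]
  | cons e rest ih =>
    intro d
    rw [List.foldl_cons]
    by_cases hsym : e.2.2 == symbol
    · by_cases hcont : d.contains e.1
      · simp only [hsym, hcont, Bool.not_true, Bool.and_false, Bool.false_eq_true, if_false]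
        rw [ih d]
        cases hd : d.get? node with
        | some v => simp
        | none =>
          have hne : (e.1 == node) = false := by
            by_contra hx
            have : e.1 = node := eq_of_beq (Bool.of_not_eq_false hx)
            rw [this] at hcont
            rw [PySem.Dict.contains_eq_isSome_get?, hd] at hcont
            simp at hcont
          simp [symbolReach, hne]
      · have hc : (e.2.2 == symbol && !(d.contains e.1)) = true := by simp [hsym, hcont]
        simp only [hc, if_true]
        rw [ih (d.insert e.1 e.2.1)]
        rw [PySem.Dict.get?_insert]
        by_cases hn : node = e.1
        · have hd : d.get? node = none := by
            rw [hn]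
            rw [PySem.Dict.contains_eq_isSome_get?] at hcont
            cases h : d.get? e.1
            · rfl
            · rw [h] at hcont; simp at hcont
          rw [hn] at hd
          simp [hn, hd, symbolReach, hsym]
        · have hne : (e.1 == node) = false := by simp; exact fun h => hn h.symm
          simp only [if_neg hn]
          simp [symbolReach, hne]
    · have h' : (e.2.2 == symbol) = false := by simpa using hsym
      simp only [h', Bool.false_and, Bool.false_eq_true, if_false]
      rw [ih d]
      have : (e.1 == node && e.2.2 == symbol) = false := by simp [hsym]
      simp [symbolReach, this]

theorem succMap_get? (edges : List (String × String × String)) (symbol node : String) :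
    (succMap edges symbol).get? node = symbolReach node edges symbol := by
  unfold succMap
  rw [succMap_aux]
  simp

-- ---- characterisation of clsMap: dict lookup = index of first block containing the state ----
def firstIdxFrom (i : Int) (L : List (List String)) (v : String) : Option Int :=
  match L with
  | [] => none
  | S :: rest => if S.contains v then some i else firstIdxFrom (i+1) rest v

theorem cls_inner (i : Int) (v : String) :
    ∀ (block : List String) (d : PySem.Dict String Int),
    (block.foldl (fun d x => d.setdefault x i) d).get? v
      = if (d.get? v).isSome then d.get? v
        else if block.contains v then some i else none := by
  intro block
  induction block with
  | nil =>
    intro d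
    cases h : d.get? v <;> simp [h]
  | cons x rest ih =>
    intro d
    rw [List.foldl_cons]
    by_cases hc : d.contains x
    · rw [PySem.Dict.setdefault_of_contains _ _ hc, ih d]
      cases hd : d.get? v with
      | some w => simp
      | none =>
        have hxv : (x == v) = false := by
          by_contra hx
          have : x = v := eq_of_beq (Bool.of_not_eq_false hx)
          rw [this, PySem.Dict.contains_eq_isSome_get?, hd] at hc
          simp at hc
        have hvx : ¬ v = x := fun h => by simp [h] at hxv
        simp [List.contains_cons, hxv, hvx]
    · have hc' : d.contains x = false := by simpa using hc
      rw [PySem.Dict.setdefault_of_not_contains _ _ hc', ih (d.insert x i)]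
      rw [PySem.Dict.get?_insert]
      by_cases hv : v = x
      · subst hv
        have hd : d.get? v = none := by
          rw [PySem.Dict.contains_eq_isSome_get?] at hc'
          cases h : d.get? v
          · rfl
          · rw [h] at hc'; simp at hc'
        simp [hd]
      · have hxv : (x == v) = false := by simp; exact fun h => hv h.symm
        simp only [if_neg hv]
        simp [List.contains_cons, hxv, hv]

theorem cls_aux (v : String) :
    ∀ (L : List (List String)) (i : Int) (d : PySem.Dict String Int),
    ((PySem.List.enumerate L i).foldl (fun d p => p.2.foldl (fun d x => d.setdefault x p.1) d) d).get? v
      = if (d.get? v).isSome then d.get? v else firstIdxFrom i L v := by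
  intro L
  induction L with
  | nil =>
    intro i d
    cases h : d.get? v <;> simp [PySem.List.enumerate_nil, firstIdxFrom, h]
  | cons S rest ih =>
    intro i d
    rw [PySem.List.enumerate_cons, List.foldl_cons]
    rw [ih (i+1) (S.foldl (fun d x => d.setdefault x i) d)]
    rw [cls_inner]
    cases hd : d.get? v with
    | some w => simp
    | none =>
      by_cases hS : S.contains v
      · have hm : v ∈ S := List.contains_iff_mem.1 hS
        simp [firstIdxFrom, hm]
      · have hm : v ∉ S := fun h => hS (List.contains_iff_mem.2 h)
        simp [firstIdxFrom, hm]

theorem clsMap_get? (sets : List (List String)) (v : String) :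
    (clsMap sets).get? v = firstIdxFrom 0 sets v := by
  unfold clsMap
  rw [cls_aux]
  simp

-- ---- firstIdxFrom facts ----
theorem fi_ge (v : String) : ∀ (L : List (List String)) (i j : Int),
    firstIdxFrom i L v = some j → i ≤ j := by
  intro L
  induction L with
  | nil => intro i j h; simp [firstIdxFrom] at h
  | cons S rest ih =>
    intro i j h
    rw [firstIdxFrom] at h
    by_cases hS : S.contains v
    · rw [if_pos hS] at h
      have : i = j := by simpa using h
      omega
    · have hS' : S.contains v = false := by simpa using hS
      rw [hS'] at h
      simp at h
      have := ih (i+1) j h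
      omega

theorem fi_isSome (v : String) : ∀ (L : List (List String)) (i : Int) (S : List String),
    S ∈ L → v ∈ S → (firstIdxFrom i L v).isSome := by
  intro L
  induction L with
  | nil => intro i S hS _; simp at hS
  | cons T rest ih =>
    intro i S hS hv
    rw [firstIdxFrom]
    by_cases hT : T.contains v
    · have hm : v ∈ T := List.contains_iff_mem.1 hT
      simp [hm]
    · have hT' : T.contains v = false := by simpa using hT
      rw [hT']
      simp only [Bool.false_eq_true, if_false]
      rcases List.mem_cons.1 hS with h | h
      · subst h
        exact absurd (List.contains_iff_mem.2 hv) hT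
      · exact ih (i+1) S h hv

theorem fi_common (s t : String) : ∀ (L : List (List String)) (i j : Int),
    firstIdxFrom i L s = some j → firstIdxFrom i L t = some j →
    ∃ S ∈ L, s ∈ S ∧ t ∈ S := by
  intro L
  induction L with
  | nil => intro i j h _; simp [firstIdxFrom] at h
  | cons S rest ih =>
    intro i j hs ht
    rw [firstIdxFrom] at hs ht
    by_cases hSs : S.contains s
    · rw [if_pos hSs] at hs
      have hij : i = j := by simpa using hs
      by_cases hSt : S.contains t
      · exact ⟨S, by simp, List.contains_iff_mem.1 hSs, List.contains_iff_mem.1 hSt⟩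
      · have hSt' : S.contains t = false := by simpa using hSt
        rw [hSt'] at ht
        simp only [Bool.false_eq_true, if_false] at ht
        have := fi_ge t rest (i+1) j ht
        omega
    · have hSs' : S.contains s = false := by simpa using hSs
      rw [hSs'] at hs
      simp only [Bool.false_eq_true, if_false] at hs
      by_cases hSt : S.contains t
      · rw [if_pos hSt] at ht
        have hij : i = j := by simpa using ht
        have := fi_ge s rest (i+1) j hs
        omega
      · have hSt' : S.contains t = false := by simpa using hSt
        rw [hSt'] at ht
        simp only [Bool.false_eq_true, if_false] at ht
        obtain ⟨T, hT, h1, h2⟩ := ih (i+1) j hs ht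
        exact ⟨T, by simp [hT], h1, h2⟩

theorem fi_eq_of_common (P : String → Prop) (s t : String) (hPs : P s) (hPt : P t) :
    ∀ (L : List (List String)), List.Pairwise (fun u w => ∀ x ∈ u, P x → x ∉ w) L →
    ∀ (S : List String), S ∈ L → s ∈ S → t ∈ S →
    ∀ (i : Int), firstIdxFrom i L s = firstIdxFrom i L t := by
  intro L
  induction L with
  | nil => intro _ S hS; simp at hS
  | cons T rest ih =>
    intro hp S hS hs ht i
    rw [firstIdxFrom, firstIdxFrom]
    rcases List.mem_cons.1 hS with h | h
    · subst h
      have h1 : S.contains s = true := List.contains_iff_mem.2 hs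
      have h2 : S.contains t = true := List.contains_iff_mem.2 ht
      rw [h1, h2]
      simp
    · have hTs : T.contains s = false := by
        rw [Bool.eq_false_iff]
        intro hc
        exact (List.pairwise_cons.1 hp).1 S h s (List.contains_iff_mem.1 hc) hPs hs
      have hTt : T.contains t = false := by
        rw [Bool.eq_false_iff]
        intro hc
        exact (List.pairwise_cons.1 hp).1 S h t (List.contains_iff_mem.1 hc) hPt ht
      rw [hTs, hTt]
      simp only [Bool.false_eq_true, if_false]
      exact ih (List.pairwise_cons.1 hp).2 S h hs ht (i+1)


-- ---- the canonical key as a function of the successor, and the bridge to A's relation ----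
def keyOf (sets : List (List String)) (a : Option String) : Option Int × Option String :=
  match a with
  | none => (none, none)
  | some t =>
    match firstIdxFrom 0 sets t with
    | some i => (some i, none)
    | none => (none, some t)

theorem keyB_eq_keyOf (sets : List (List String)) (edges : List (String × String × String))
    (symbol x : String) :
    keyB (succMap edges symbol) (clsMap sets) x = keyOf sets (symbolReach x edges symbol) := by
  unfold keyB keyOf
  rw [succMap_get?]
  cases h : symbolReach x edges symbol with
  | none => simp
  | some t => simp [clsMap_get?]

theorem pyOptIn_some (v : String) (s : List String) : pyOptIn (some v) s = s.contains v := by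
  rw [Bool.eq_iff_iff]
  simp only [pyOptIn, List.any_eq_true, beq_iff_eq, Option.some.injEq, List.contains_iff_mem]
  exact ⟨fun ⟨x, hx, e⟩ => e ▸ hx, fun h => ⟨v, h, rfl⟩⟩

theorem pyOptIn_none (s : List String) : pyOptIn none s = false := by
  simp [pyOptIn]

theorem sameSet_none_left (b : Option String) (sets : List (List String)) :
    sameSet none b sets = false := by
  induction sets with
  | nil => simp [sameSet]
  | cons s rest ih => simp [sameSet, pyOptIn_none, ih]

theorem sameSet_none_right (a : Option String) (sets : List (List String)) :
    sameSet a none sets = false := by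
  induction sets with
  | nil => simp [sameSet]
  | cons s rest ih => simp [sameSet, pyOptIn_none, ih]

theorem sameSet_some (x y : String) (sets : List (List String)) :
    sameSet (some x) (some y) sets = sets.any (fun s => s.contains x && s.contains y) := by
  induction sets with
  | nil => simp [sameSet]
  | cons s rest ih =>
    simp only [sameSet, pyOptIn_some, List.any_cons, ih]
    by_cases h : s.contains x && s.contains y <;> simp_all

-- A's pairwise test equals equality of canonical keys, given pairwise-disjoint blocks
theorem symbolReach_mem_targets (edges : List (String × String × String)) (symbol x t : String)
    (h : symbolReach x edges symbol = some t) : t ∈ symTargets edges symbol := by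
  induction edges with
  | nil => simp [symbolReach] at h
  | cons e rest ih =>
    rw [symbolReach] at h
    by_cases hc : e.1 == x && e.2.2 == symbol
    · rw [if_pos hc] at h
      have ht : e.2.1 = t := by simpa using h
      have hsym : (e.2.2 == symbol) = true := ((Bool.and_eq_true _ _).mp hc).2
      unfold symTargets
      rw [List.filter_cons_of_pos (by exact hsym)]
      simp [ht]
    · rw [if_neg hc] at h
      have := ih h
      unfold symTargets at this ⊢
      rw [List.filter_cons]
      by_cases hsym : (e.2.2 == symbol) = true
      · simp only [hsym, if_true, List.map_cons]
        exact List.mem_cons_of_mem _ this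
      · simp only [hsym, Bool.false_eq_true, if_false]
        exact this

theorem key_bridge (sets : List (List String)) (P : String → Prop)
    (hdisj : List.Pairwise (fun u w => ∀ x ∈ u, P x → x ∉ w) sets) (a b : Option String)
    (ha : ∀ t, a = some t → P t) (hb : ∀ t, b = some t → P t) :
    (a == b || sameSet a b sets) = (keyOf sets a == keyOf sets b) := by
  cases a with
  | none =>
    cases b with
    | none => simp [keyOf]
    | some t =>
      cases h : firstIdxFrom 0 sets t <;>
        simp [keyOf, h, sameSet_none_left]
  | some s =>
    cases b with
    | none =>
      cases h : firstIdxFrom 0 sets s <;>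
        simp [keyOf, h, sameSet_none_right]
    | some t =>
      by_cases hst : s = t
      · subst hst; simp [keyOf]
      · have hbeq : (some s == some t) = false := by simp [hst]
        rw [hbeq, Bool.false_or, sameSet_some, keyOf, keyOf]
        by_cases hc : ∃ S ∈ sets, s ∈ S ∧ t ∈ S
        · obtain ⟨S, hS, h1, h2⟩ := hc
          have hfi : firstIdxFrom 0 sets s = firstIdxFrom 0 sets t :=
            fi_eq_of_common P s t (ha s rfl) (hb t rfl) sets hdisj S hS h1 h2 0
          have hsome : (firstIdxFrom 0 sets s).isSome := fi_isSome s sets 0 S hS h1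
          have hany : sets.any (fun S => S.contains s && S.contains t) = true := by
            simp only [List.any_eq_true, Bool.and_eq_true, List.contains_iff_mem]
            exact ⟨S, hS, h1, h2⟩
          cases hfs : firstIdxFrom 0 sets s with
          | none => rw [hfs] at hsome; simp at hsome
          | some j => rw [hfs] at hfi; rw [← hfi, hany]; simp
        · have hany : sets.any (fun S => S.contains s && S.contains t) = false := by
            rw [Bool.eq_false_iff]
            intro hx
            simp only [List.any_eq_true, Bool.and_eq_true] at hx
            obtain ⟨S, hS, h1, h2⟩ := hx
            exact hc ⟨S, hS, List.contains_iff_mem.1 h1, List.contains_iff_mem.1 h2⟩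
          rw [hany]
          cases hfs : firstIdxFrom 0 sets s with
          | none =>
            cases hft : firstIdxFrom 0 sets t with
            | none => simp [hst]
            | some j2 => simp
          | some j1 =>
            cases hft : firstIdxFrom 0 sets t with
            | none => simp
            | some j2 =>
              have hne : j1 ≠ j2 := by
                intro he
                subst he
                exact hc (fi_common s t sets 0 j1 hfs hft)
              simp [hne]

-- ---- the abstract per-block grouping both ports compute ----
def specGroups (s : List String) (c : Nat → Nat → Bool) : List Nat → List (List String)
  | [] => []
  | p :: rest =>
    (s.getD p "" :: ((List.range' (p+1) (s.length - (p+1))).filter (c p)).map (fun j => s.getD j ""))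
    :: specGroups s c (rest.filter (fun q => !c p q))
  termination_by pending => pending.length
  decreasing_by
    simp only [List.length_unattach, List.length_cons]
    exact Nat.lt_succ_of_le (le_trans (List.length_filter_le _ _) (by simp))

-- ---- A's nested loops compute specGroups (flag array = already-grouped indices) ----
theorem inner_fold (s : List String) (c : Nat → Bool) :
    ∀ (js : List Nat) (t : List String) (fl : List Nat),
    js.foldl (fun (st2 : List String × List Nat) j =>
        if c j then (st2.1 ++ [s.getD j ""], st2.2.set j 1) else st2) (t, fl)
      = (t ++ (js.filter c).map (fun j => s.getD j ""),
         js.foldl (fun f j => if c j then f.set j 1 else f) fl) := by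
  intro js
  induction js with
  | nil => intro t fl; simp
  | cons j js ih =>
    intro t fl
    rw [List.foldl_cons, List.foldl_cons]
    by_cases h : c j
    · rw [List.filter_cons_of_pos h]
      simp only [h, if_true]
      rw [ih]
      simp
    · have h' : c j = false := by simpa using h
      rw [List.filter_cons_of_neg (by simp [h'])]
      simp only [h', Bool.false_eq_true, if_false]
      exact ih t fl

theorem flag_fold_length (c : Nat → Bool) :
    ∀ (js : List Nat) (fl : List Nat),
    (js.foldl (fun f j => if c j then f.set j 1 else f) fl).length = fl.length := by
  intro js
  induction js with
  | nil => intro fl; rfl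
  | cons j js ih =>
    intro fl
    rw [List.foldl_cons]
    by_cases h : c j <;> simp [h, ih]

theorem flag_fold_getD (c : Nat → Bool) :
    ∀ (js : List Nat) (fl : List Nat) (k : Nat), k < fl.length →
    (js.foldl (fun f j => if c j then f.set j 1 else f) fl).getD k 0
      = if k ∈ js ∧ c k then 1 else fl.getD k 0 := by
  intro js
  induction js with
  | nil => intro fl k hk; simp
  | cons j js ih =>
    intro fl k hk
    rw [List.foldl_cons]
    by_cases hcj : c j
    · simp only [hcj, if_true]
      rw [ih (fl.set j 1) k (by simpa using hk)]
      by_cases hkj : k = j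
      · subst hkj
        have hset : (fl.set k 1)[k]?.getD 0 = 1 := by
          rw [List.getElem?_set_self hk]
          rfl
        simp [hcj, hset, List.getD_eq_getElem?_getD]
      · have hset : (fl.set j 1).getD k 0 = fl.getD k 0 := by
          rw [List.getD_eq_getElem?_getD, List.getElem?_set_ne (fun h => hkj h.symm),
            ← List.getD_eq_getElem?_getD]
        rw [hset]
        by_cases hm : k ∈ js <;> by_cases hck : c k <;>
          simp [hm, hck, hkj]
    · have h' : c j = false := by simpa using hcj
      simp only [h', Bool.false_eq_true, if_false]
      rw [ih fl k hk]
      by_cases hkj : k = j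
      · subst hkj
        simp [hcj]
      · simp [hkj]

theorem outer_fold (s : List String) (c : Nat → Nat → Bool) :
    ∀ (m i : Nat) (fl : List Nat) (acc : List (List String)),
    fl.length = s.length → i + m = s.length →
    ((List.range' i m).foldl (fun (st : List Nat × List (List String)) i' =>
        if st.1.getD i' 0 == 0 then
          let r := (List.range' (i'+1) (s.length - (i'+1))).foldl
            (fun (st2 : List String × List Nat) j =>
              if c i' j then (st2.1 ++ [s.getD j ""], st2.2.set j 1) else st2)
            ([s.getD i' ""], st.1.set i' 1)
          (r.2, st.2 ++ [r.1])
        else st) (fl, acc)).2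
      = acc ++ specGroups s c
          ((List.range' i m).filter (fun k => fl.getD k 0 == 0)) := by
  intro m
  induction m with
  | zero =>
    intro i fl acc _ _
    simp [specGroups]
  | succ m ih =>
    intro i fl acc hfl hn
    rw [List.range'_succ, List.foldl_cons, List.filter_cons]
    by_cases h0 : fl.getD i 0 = 0
    · have h0' : (fl.getD i 0 == 0) = true := by simp only [beq_iff_eq]; exact h0
      simp only [h0', if_true]
      have hm : s.length - (i + 1) = m := by omega
      rw [hm]
      rw [inner_fold s (fun j => c i j) (List.range' (i+1) m) [s.getD i ""] (fl.set i 1)]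
      have hlen2 : ((List.range' (i+1) m).foldl
          (fun f j => if c i j then f.set j 1 else f) (fl.set i 1)).length = s.length := by
        rw [flag_fold_length]; simpa using hfl
      rw [ih (i+1)
        ((List.range' (i+1) m).foldl
          (fun f j => if c i j then f.set j 1 else f) (fl.set i 1))
        (acc ++ [[s.getD i ""] ++
          ((List.range' (i+1) m).filter (fun j => c i j)).map (fun j => s.getD j "")])
        hlen2 (by omega)]
      have hfilters :
          (List.range' (i+1) m).filter (fun k =>
              ((List.range' (i+1) m).foldl
                (fun f j => if c i j then f.set j 1 else f) (fl.set i 1)).getD k 0 == 0)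
            = ((List.range' (i+1) m).filter (fun k => fl.getD k 0 == 0)).filter
                (fun q => !c i q) := by
        rw [List.filter_filter]
        apply List.filter_congr
        intro k hk
        have hkr := (List.mem_range'_1).1 hk
        have hkl : k < fl.length := by omega
        have hks : k < (fl.set i 1).length := by simpa using hkl
        rw [flag_fold_getD _ _ _ _ hks]
        have hne : i ≠ k := by omega
        have hsetk2 : (fl.set i 1)[k]? = fl[k]? := List.getElem?_set_ne hne
        by_cases hc : c i k
        · simp [hc, hk]
        · simp [hc, hsetk2]
      rw [hfilters, specGroups, hm]
      simp
    · have h0' : (fl.getD i 0 == 0) = false := by simp only [beq_eq_false_iff_ne, ne_eq]; exact h0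
      simp only [h0', Bool.false_eq_true, if_false]
      exact ih (i+1) fl acc hfl (by omega)


-- ---- list-index utilities ----
theorem map_getD_range' (s : List String) :
    ∀ (m a : Nat), a + m = s.length →
    (List.range' a m).map (fun j => s.getD j "") = s.drop a := by
  intro m
  induction m with
  | zero =>
    intro a ha
    rw [List.drop_eq_nil_of_le (by omega)]
    simp
  | succ m ih =>
    intro a ha
    have haa : a < s.length := by omega
    rw [List.range'_succ, List.map_cons, ih (a+1) (by omega),
      List.drop_eq_getElem_cons haa]
    rw [List.getD_eq_getElem?_getD, List.getElem?_eq_getElem haa]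
    rfl

theorem filter_ofList {K : Type} [BEq K] [LawfulBEq K] (pred : K → Bool) :
    ∀ (l : List K),
    (PySem.Set.ofList l).filter pred = PySem.Set.ofList (l.filter pred) := by
  intro l
  induction l with
  | nil => rfl
  | cons x xs ih =>
    rw [PySem.Set.ofList_cons, List.filter_cons, List.filter_cons]
    by_cases h : pred x
    · simp only [h, if_true]
      rw [PySem.Set.ofList_cons]
      congr 1
      simp only [PySem.Set.discard]
      rw [List.filter_comm, ih]
    · have h' : pred x = false := by simpa using h
      simp only [h', Bool.false_eq_true, if_false]
      simp only [PySem.Set.discard]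
      rw [List.filter_comm, ih]
      apply List.filter_eq_self.2
      intro y hy
      have hyf : y ∈ xs.filter pred := by
        exact (PySem.Set.mem_ofList _ _).1 hy
      have hpy : pred y = true := List.of_mem_filter hyf
      have : y ≠ x := fun he => by rw [he, h'] at hpy; exact Bool.false_ne_true hpy
      simp [this]

theorem filter_take_nil {K : Type} [BEq K] [LawfulBEq K] (s : List String) (k : String → K)
    (p : Nat) (hp : p < s.length) (κ : K)
    (hmin : ∀ j, j < p → k (s.getD j "") ≠ κ) :
    (s.take p).filter (fun x => k x == κ) = [] := by
  rw [List.filter_eq_nil_iff]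
  intro x hx
  obtain ⟨i, hi, hix⟩ := List.mem_iff_getElem.1 hx
  have hil : i < p := by
    rw [List.length_take] at hi
    omega
  have hxi : x = s.getD i "" := by
    rw [← hix, List.getElem_take, List.getD_eq_getElem?_getD,
      List.getElem?_eq_getElem (by omega : i < s.length)]
    rfl
  rw [hxi]
  have := hmin i hil
  rw [List.getD_eq_getElem?_getD] at this
  simpa using this

theorem group_head {K : Type} [BEq K] [LawfulBEq K] (s : List String) (k : String → K)
    (p : Nat) (hp : p < s.length) (κ : K) (hκ : κ = k (s.getD p ""))
    (hmin : ∀ j, j < p → k (s.getD j "") ≠ κ) :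
    s.filter (fun x => k x == κ)
      = s.getD p "" :: ((List.range' (p+1) (s.length - (p+1))).filter
          (fun j => κ == k (s.getD j ""))).map (fun j => s.getD j "") := by
  have hgp : s.getD p "" = s[p] := by
    rw [List.getD_eq_getElem?_getD, List.getElem?_eq_getElem hp]; rfl
  conv_lhs => rw [← List.take_append_drop p s, List.drop_eq_getElem_cons hp]
  rw [List.filter_append, filter_take_nil s k p hp κ hmin, List.nil_append, List.filter_cons]
  have hself : (k (s[p]) == κ) = true := by
    rw [hκ, hgp]; simp
  rw [hself]
  simp only [if_true]
  congr 1
  · exact hgp.symm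
  · rw [← map_getD_range' s (s.length - (p+1)) (p+1) (by omega)]
    rw [List.filter_map]
    congr 1
    apply List.filter_congr
    intro j _
    simp only [Function.comp]
    rw [Bool.eq_iff_iff, beq_iff_eq, beq_iff_eq]
    exact eq_comm

theorem specGroups_eq {K : Type} [BEq K] [LawfulBEq K] (s : List String) (k : String → K) :
    ∀ (N : Nat) (pending : List Nat), pending.length ≤ N →
    pending.Pairwise (· < ·) →
    (∀ q ∈ pending, q < s.length) →
    (∀ j, j < s.length → j ∉ pending → ∀ q ∈ pending, k (s.getD j "") ≠ k (s.getD q "")) →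
    specGroups s (fun i j => k (s.getD i "") == k (s.getD j "")) pending
      = (PySem.Set.ofList (pending.map (fun q => k (s.getD q "")))).map
          (fun κ => s.filter (fun x => k x == κ)) := by
  intro N
  induction N with
  | zero =>
    intro pending hlen _ _ _
    have : pending = [] := List.eq_nil_of_length_eq_zero (Nat.le_zero.mp hlen)
    subst this
    simp [specGroups, PySem.Set.ofList]
  | succ N ih =>
    intro pending hlen hpair hmem hsat
    cases pending with
    | nil => simp [specGroups, PySem.Set.ofList]
    | cons p rest =>
      have hp : p < s.length := hmem p (by simp)
      have hplt : ∀ q ∈ rest, p < q := fun q hq => (List.pairwise_cons.1 hpair).1 q hq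
      rw [specGroups, List.map_cons, PySem.Set.ofList_cons, List.map_cons]
      have hmin : ∀ j, j < p → k (s.getD j "") ≠ k (s.getD p "") := by
        intro j hj
        have hjnot : j ∉ p :: rest := by
          intro hjm
          rcases List.mem_cons.1 hjm with h | h
          · omega
          · have := hplt j h; omega
        exact hsat j (by omega) hjnot p (by simp)
      congr 1
      · exact (group_head s k p hp _ rfl hmin).symm
      · -- tail: discard = filter, commute the filter with the map, apply the IH
        have hdisc : PySem.Set.discard (PySem.Set.ofList (rest.map (fun q => k (s.getD q ""))))
            (k (s.getD p ""))
            = PySem.Set.ofList ((rest.map (fun q => k (s.getD q ""))).filter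
                (fun x => !(x == k (s.getD p "")))) := by
          simp only [PySem.Set.discard]
          rw [filter_ofList]
        rw [hdisc, List.filter_map]
        have hpred : (rest.filter ((fun x => !(x == k (s.getD p ""))) ∘ (fun q => k (s.getD q ""))))
            = rest.filter (fun q => !(k (s.getD p "") == k (s.getD q ""))) := by
          apply List.filter_congr
          intro q _
          simp only [Function.comp]
          rw [Bool.eq_iff_iff]
          simp only [Bool.not_eq_eq_eq_not, Bool.not_true, Bool.not_eq_true', beq_eq_false_iff_ne,
            ne_eq]
          exact ⟨fun h he => h he.symm, fun h he => h he.symm⟩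
        rw [hpred]
        apply ih
        · have : rest.length ≤ N := by simpa using Nat.succ_le_succ_iff.1 hlen
          exact le_trans (List.length_filter_le _ _) this
        · exact List.Pairwise.sublist List.filter_sublist (List.pairwise_cons.1 hpair).2
        · intro q hq
          exact hmem q (by simp [(List.mem_filter.1 hq).1])
        · intro j hj hjnot q hq
          have hqrest := (List.mem_filter.1 hq).1
          have hqkey : (!(k (s.getD p "") == k (s.getD q ""))) = true := (List.mem_filter.1 hq).2
          have hqne : k (s.getD p "") ≠ k (s.getD q "") := by
            simpa using hqkey
          by_cases hjp : j ∈ p :: rest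
          · -- j was pending but is no longer: its key is the founder's key
            have hjkey : k (s.getD j "") = k (s.getD p "") := by
              rcases List.mem_cons.1 hjp with h | h
              · rw [h]
              · by_contra hne
                have : j ∈ rest.filter (fun q => !(k (s.getD p "") == k (s.getD q ""))) := by
                  rw [List.mem_filter]
                  exact ⟨h, by simpa using fun he => hne he.symm⟩
                exact hjnot this
            rw [hjkey]
            exact hqne
          · exact hsat j hj hjp q (by simp [hqrest])


-- ---- B's per-block dict of buckets: values = key-classes in first-occurrence order ----
theorem buckets_values (succ : PySem.Dict String String) (cls : PySem.Dict String Int)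
    (s : List String) :
    (s.foldl (fun (d : PySem.Dict (Option Int × Option String) (List String)) x =>
        d.modify (keyB succ cls x) [] (fun g => g ++ [x])) PySem.Dict.empty).values
      = (PySem.Set.ofList (s.map (fun x => keyB succ cls x))).map
          (fun κ => s.filter (fun x => keyB succ cls x == κ)) := by
  have hkeys : (s.foldl (fun (d : PySem.Dict (Option Int × Option String) (List String)) x =>
        d.modify (keyB succ cls x) [] (fun g => g ++ [x])) PySem.Dict.empty).keys
      = PySem.Set.ofList (s.map (fun x => keyB succ cls x)) := by
    rw [PySem.Dict.keys_foldl_modify_key s (fun x => keyB succ cls x) []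
      (fun _ x => fun g => g ++ [x]) PySem.Dict.empty]
    simp [PySem.Set.update_nil_left]
  have hnodup : (s.foldl (fun (d : PySem.Dict (Option Int × Option String) (List String)) x =>
        d.modify (keyB succ cls x) [] (fun g => g ++ [x])) PySem.Dict.empty).keys.Nodup := by
    apply PySem.Dict.nodup_keys_foldl_modify_key s (fun x => keyB succ cls x) []
      (fun _ x => fun g => g ++ [x]) PySem.Dict.empty
    simp [PySem.Dict.nodup_keys_empty]
  rw [PySem.Dict.values_eq_map_keys _ hnodup [], hkeys]
  apply List.map_congr_left
  intro κ _
  have hfold : (s.foldl (fun (d : PySem.Dict (Option Int × Option String) (List String)) x =>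
        d.modify (keyB succ cls x) [] (fun g => g ++ [x])) PySem.Dict.empty)
      = ((s.map (fun x => (keyB succ cls x, x))).foldl
          (fun d p => d.modify p.1 [] (fun g => g ++ [p.2])) PySem.Dict.empty) := by
    rw [List.foldl_map]
  rw [hfold, PySem.Dict.getD_foldl_modify_append]
  rw [List.filter_map]
  rw [List.map_map]
  simp only [PySem.Dict.getD_empty, List.nil_append]
  show List.map (fun x => x) (s.filter (fun x => keyB succ cls x == κ))
      = s.filter (fun x => keyB succ cls x == κ)
  exact List.map_id' _

-- ---- assembly ----
theorem per_block (sets : List (List String)) (edges : List (String × String × String))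
    (symbol : String)
    (hdisj : List.Pairwise (fun u w => ∀ x ∈ u, x ∈ symTargets edges symbol → x ∉ w) sets)
    (s : List String) (h : s.length > 1) :
    ((List.range s.length).foldl (fun (st : List Nat × List (List String)) i =>
        if st.1.getD i 0 == 0 then
          let r := (List.range' (i+1) (s.length - (i+1))).foldl
            (fun (st2 : List String × List Nat) j =>
              let a := symbolReach (s.getD i "") edges symbol
              let b := symbolReach (s.getD j "") edges symbol
              if a == b || sameSet a b sets then (st2.1 ++ [s.getD j ""], st2.2.set j 1) else st2)
            ([s.getD i ""], st.1.set i 1)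
          (r.2, st.2 ++ [r.1])
        else st) (List.replicate s.length 0, ([] : List (List String)))).2
      = (s.foldl (fun (d : PySem.Dict (Option Int × Option String) (List String)) x =>
          d.modify (keyB (succMap edges symbol) (clsMap sets) x) [] (fun g => g ++ [x]))
          PySem.Dict.empty).values := by
  rw [List.range_eq_range']
  rw [outer_fold s
    (fun i j => symbolReach (s.getD i "") edges symbol == symbolReach (s.getD j "") edges symbol
      || sameSet (symbolReach (s.getD i "") edges symbol) (symbolReach (s.getD j "") edges symbol) sets)
    s.length 0 (List.replicate s.length 0) [] (by simp) (by omega)]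
  have hfilt : (List.range' 0 s.length).filter
      (fun k => (List.replicate s.length 0).getD k 0 == 0) = List.range' 0 s.length := by
    apply List.filter_eq_self.2
    intro j hj
    have hjr := (List.mem_range'_1).1 hj
    simp [List.getD_eq_getElem?_getD, show j < s.length by omega]
  rw [hfilt, List.nil_append]
  have hrel : (fun i j => symbolReach (s.getD i "") edges symbol == symbolReach (s.getD j "") edges symbol
      || sameSet (symbolReach (s.getD i "") edges symbol) (symbolReach (s.getD j "") edges symbol) sets)
      = (fun i j => keyB (succMap edges symbol) (clsMap sets) (s.getD i "")
          == keyB (succMap edges symbol) (clsMap sets) (s.getD j "")) := by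
    funext i j
    rw [key_bridge sets (· ∈ symTargets edges symbol) hdisj _ _
      (fun t ht => symbolReach_mem_targets edges symbol _ t ht)
      (fun t ht => symbolReach_mem_targets edges symbol _ t ht), keyB_eq_keyOf, keyB_eq_keyOf]
  rw [hrel]
  rw [specGroups_eq s (fun x => keyB (succMap edges symbol) (clsMap sets) x)
    s.length (List.range' 0 s.length) (by simp) (List.pairwise_lt_range' 1)
    (fun q hq => by have := (List.mem_range'_1).1 hq; omega)
    (fun j hj hjn => absurd (List.mem_range'_1.2 ⟨by omega, by omega⟩) hjn)]
  rw [buckets_values]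
  have hmap : (List.range' 0 s.length).map
      (fun q => keyB (succMap edges symbol) (clsMap sets) (s.getD q ""))
      = s.map (fun x => keyB (succMap edges symbol) (clsMap sets) x) := by
    have h0 : (List.range' 0 s.length).map (fun j => s.getD j "") = s := by
      simpa using map_getD_range' s s.length 0 (by omega)
    calc (List.range' 0 s.length).map
          (fun q => keyB (succMap edges symbol) (clsMap sets) (s.getD q ""))
        = ((List.range' 0 s.length).map (fun j => s.getD j "")).map
            (fun x => keyB (succMap edges symbol) (clsMap sets) x) := by
          rw [List.map_map]
          simp [Function.comp]
      _ = s.map (fun x => keyB (succMap edges symbol) (clsMap sets) x) := by rw [h0]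
  rw [hmap]

-- ===== VERDICT (by name: the statement is the Claim_ definition above) =====
theorem spDFA_spec : Claim_equal_spDFA := by
  intro sets edges symbol _ hpre
  show spDFA sets edges symbol = spDFA_alt sets edges symbol
  unfold spDFA spDFA_alt
  refine congrFun (congrFun (congrArg _ ?_) _) _
  funext new_sets s
  by_cases h : s.length > 1
  · simp only [h, if_true]
    congr 1
    exact per_block sets edges symbol hpre s h
  · simp [h]
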